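-- pv_equiv track=rewrite | github.com/johansievertlindeskog/EDAN20-Language-Technology | extractingNounGroupsLab4.py | extract_features_sent_dyn
-- ===== SOURCE A (Python) =====
-- def extract_features_sent_dyn(sentence, w_size, feature_names):
--     """
--     Extract the features from one sentence
--     returns X and y, where X is a list of dictionaries and
--     y is a list of symbols
--     :param sentence: string containing the CoNLL structure of a sentence
--     :param w_size:
--     :return:
--     """
--
--     # We pad the sentence to extract the context window more easily
--     start = [{'form': 'BOS', 'pos': 'BOS', 'chunk': 'BOS'}]
--     end = [{'form': 'EOS', 'pos': 'EOS', 'chunk': 'EOS'}]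
--     start *= w_size
--     end *= w_size
--     padded_sentence = start + sentence
--     padded_sentence += end
--
--     # We extract the features and the classes
--     # X contains is a list of features, where each feature vector is a dictionary
--     # y is the list of classes
--     X = list()
--     y = list()
--     for i in range(len(padded_sentence) - 2 * w_size):
--         # x is a row of X
--         x = list()
--         # The words in lower case
--         for j in range(2 * w_size + 1):
--             x.append(padded_sentence[i + j]['form'].lower())
--         # The POS
--         for j in range(2 * w_size + 1):
--             x.append(padded_sentence[i + j]['pos'])
--         # The chunks (Up to the word)
--
--         for j in range(w_size):
--             x.append(padded_sentence[i + j]['chunk'])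
--
--         # We represent the feature vector as a dictionary
--         X.append(dict(zip(feature_names, x)))
--         # The classes are stored in a list
--         y.append(padded_sentence[i + w_size]['chunk'])
--     return X, y
-- ===== SOURCE B (Python) =====
-- def extract_features_sent_dyn(sentence, w_size, feature_names):
--     """Column-based re-implementation: precompute form/pos/chunk columns once,
--     then assemble each window by slicing, instead of re-reading dict keys and
--     re-lowercasing per overlapping window."""
--     bos = {'form': 'BOS', 'pos': 'BOS', 'chunk': 'BOS'}
--     eos = {'form': 'EOS', 'pos': 'EOS', 'chunk': 'EOS'}
--     padded = [bos] * w_size + sentence + [eos] * w_size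
--     forms = [t['form'].lower() for t in padded]
--     poss = [t['pos'] for t in padded]
--     chunks = [t['chunk'] for t in padded]
--     span = 2 * w_size + 1
--     X = []
--     y = []
--     for i in range(len(padded) - 2 * w_size):
--         x = forms[i:i + span] + poss[i:i + span] + chunks[i:i + w_size]
--         X.append(dict(zip(feature_names, x)))
--         y.append(chunks[i + w_size])
--     return X, y
-- ===== Notes on version B (the rewrite author's own statement) =====
-- stated objective: alternative
-- what changed: B precomputes three parallel columns (lowercased forms, POS, chunks) over the padded sentence once and assembles each feature row by slicing the columns, instead of A's per-window inner loops that re-read dict keys and re-lowercase each overlapping position.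
import Mathlib
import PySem

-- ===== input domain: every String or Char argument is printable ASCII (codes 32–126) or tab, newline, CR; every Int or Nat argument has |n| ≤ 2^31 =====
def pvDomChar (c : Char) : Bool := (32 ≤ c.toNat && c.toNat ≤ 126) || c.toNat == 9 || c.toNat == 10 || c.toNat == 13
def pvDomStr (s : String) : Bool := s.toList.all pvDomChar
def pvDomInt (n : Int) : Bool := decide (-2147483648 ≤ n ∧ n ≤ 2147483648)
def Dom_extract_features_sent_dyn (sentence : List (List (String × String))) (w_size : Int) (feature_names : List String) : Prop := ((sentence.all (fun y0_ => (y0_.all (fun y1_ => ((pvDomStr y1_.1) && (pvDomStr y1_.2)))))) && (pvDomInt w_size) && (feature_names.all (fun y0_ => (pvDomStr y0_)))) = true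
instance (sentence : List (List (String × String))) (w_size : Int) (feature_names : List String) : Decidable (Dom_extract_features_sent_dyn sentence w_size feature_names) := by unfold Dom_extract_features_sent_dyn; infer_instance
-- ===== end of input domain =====

-- B precomputes lowercased-form / pos / chunk columns once over the padded sentence and
-- assembles each window row by slicing the columns, instead of re-reading dict keys and
-- re-lowercasing inside every overlapping window (objective: alternative decomposition).

-- shared primitive: Python's `token[key]` on a dict-valued token (exact where the key is present; Pre_ guarantees that)
def pvGetKey (t : List (String × String)) (k : String) : String :=
  PySem.Dict.getD (PySem.Dict.mk t) k ""

-- ===== PORT A =====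
def extract_features_sent_dyn (sentence : List (List (String × String))) (w_size : Int) (feature_names : List String) : (List (List (String × String))) × List String :=
  let start := PySem.List.pyRepeat [[("form","BOS"),("pos","BOS"),("chunk","BOS")]] w_size
  let stop  := PySem.List.pyRepeat [[("form","EOS"),("pos","EOS"),("chunk","EOS")]] w_size
  let padded := start ++ sentence ++ stop
  (PySem.List.pyRange 0 ((padded.length : Int) - 2 * w_size) 1).foldl
    (fun (acc : (List (List (String × String))) × List String) i =>
      let x1 := (PySem.List.pyRange 0 (2 * w_size + 1) 1).foldl
        (fun x j => x ++ [PySem.Str.lower (pvGetKey (PySem.List.pyGetD padded (i + j) []) "form")]) []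
      let x2 := (PySem.List.pyRange 0 (2 * w_size + 1) 1).foldl
        (fun x j => x ++ [pvGetKey (PySem.List.pyGetD padded (i + j) []) "pos"]) x1
      let x3 := (PySem.List.pyRange 0 w_size 1).foldl
        (fun x j => x ++ [pvGetKey (PySem.List.pyGetD padded (i + j) []) "chunk"]) x2
      (acc.1 ++ [(PySem.Dict.ofList (feature_names.zip x3)).items],
       acc.2 ++ [pvGetKey (PySem.List.pyGetD padded (i + w_size) []) "chunk"]))
    ([], [])

-- ===== PORT B =====
def extract_features_sent_dyn_alt (sentence : List (List (String × String))) (w_size : Int) (feature_names : List String) : (List (List (String × String))) × List String :=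
  let padded := PySem.List.pyRepeat [[("form","BOS"),("pos","BOS"),("chunk","BOS")]] w_size
    ++ sentence ++ PySem.List.pyRepeat [[("form","EOS"),("pos","EOS"),("chunk","EOS")]] w_size
  let forms := padded.map (fun t => PySem.Str.lower (pvGetKey t "form"))
  let poss := padded.map (fun t => pvGetKey t "pos")
  let chunks := padded.map (fun t => pvGetKey t "chunk")
  let span := 2 * w_size + 1
  (PySem.List.pyRange 0 ((padded.length : Int) - 2 * w_size) 1).foldl
    (fun (acc : (List (List (String × String))) × List String) i =>
      let x := PySem.List.slice forms (some i) (some (i + span))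
        ++ PySem.List.slice poss (some i) (some (i + span))
        ++ PySem.List.slice chunks (some i) (some (i + w_size))
      (acc.1 ++ [(PySem.Dict.ofList (feature_names.zip x)).items],
       acc.2 ++ [PySem.List.pyGetD chunks (i + w_size) ""]))
    ([], [])

-- ===== PRECONDITION & SPEC =====
-- Pre_ excludes exactly the inputs where Python A raises: a negative w_size (the final
-- index padded[i + w_size] then always goes out of range) and tokens missing one of the
-- keys 'form'/'pos'/'chunk' (KeyError).
def Pre_extract_features_sent_dyn (sentence : List (List (String × String))) (w_size : Int) (feature_names : List String) : Prop :=
  0 ≤ w_size ∧ (sentence.all (fun t => (PySem.Dict.mk t).contains "form"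
    && (PySem.Dict.mk t).contains "pos" && (PySem.Dict.mk t).contains "chunk")) = true
instance (sentence : List (List (String × String))) (w_size : Int) (feature_names : List String) : Decidable (Pre_extract_features_sent_dyn sentence w_size feature_names) := by unfold Pre_extract_features_sent_dyn; infer_instance

def pvWitness_extract_features_sent_dyn : (List (List (String × String))) × Int × List String :=
  ([[("form","The"),("pos","DT"),("chunk","B-NP")],[("form","cat"),("pos","NN"),("chunk","I-NP")]],
   1, ["w-1","w0","w1","p-1","p0","p1","c-1"])

def Spec_extract_features_sent_dyn (sentence : List (List (String × String))) (w_size : Int) (feature_names : List String) (out : (List (List (String × String))) × List String) : Prop := out = extract_features_sent_dyn_alt sentence w_size feature_names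
instance (sentence : List (List (String × String))) (w_size : Int) (feature_names : List String) (out : (List (List (String × String))) × List String) : Decidable (Spec_extract_features_sent_dyn sentence w_size feature_names out) := by unfold Spec_extract_features_sent_dyn; infer_instance

-- ===== CLAIM (what is proved, stated in full; the proofs are below) =====
def Claim_equal_extract_features_sent_dyn : Prop := ∀ (sentence : List (List (String × String))) (w_size : Int) (feature_names : List String), Dom_extract_features_sent_dyn sentence w_size feature_names → Pre_extract_features_sent_dyn sentence w_size feature_names → Spec_extract_features_sent_dyn sentence w_size feature_names (extract_features_sent_dyn sentence w_size feature_names)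

-- ===== LEMMAS AND PROOFS =====

theorem map_range_getD {α : Type} (xs : List α) (a m : Nat) (d : α) (h : a + m ≤ xs.length) :
    (List.range m).map (fun k => xs.getD (a + k) d) = (xs.drop a).take m := by
  induction m with
  | zero => simp
  | succ m ih =>
    rw [List.range_succ, List.map_append, ih (by omega)]
    have hlt : a + m < xs.length := by omega
    have hm : m < (xs.drop a).length := by simp; omega
    rw [List.take_add_one]
    simp [List.getElem?_drop, List.getD_eq_getElem?_getD, (List.getElem?_eq_getElem hlt)]

theorem map_pyRange_window {α : Type} (xs : List α) (i m : Int) (d : α)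
    (hi : 0 ≤ i) (hm : 0 ≤ m) (h : i + m ≤ (xs.length : Int)) :
    (PySem.List.pyRange 0 m 1).map (fun j => PySem.List.pyGetD xs (i + j) d)
      = (xs.drop i.toNat).take m.toNat := by
  rw [PySem.List.pyRange_one, List.map_map]
  have : ((fun j => PySem.List.pyGetD xs (i + j) d) ∘ fun k : Nat => (0 : Int) + (k : Int))
      = fun k : Nat => PySem.List.pyGetD xs (i + k) d := by
    funext k; simp
  rw [this]
  have hcast : ∀ k : Nat, PySem.List.pyGetD xs (i + (k : Int)) d = xs.getD (i.toNat + k) d := by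
    intro k
    have : i + (k : Int) = ((i.toNat + k : Nat) : Int) := by omega
    rw [this, PySem.List.pyGetD_natCast]
  calc (List.range (m - 0).toNat).map (fun k : Nat => PySem.List.pyGetD xs (i + (k : Int)) d)
      = (List.range m.toNat).map (fun k => xs.getD (i.toNat + k) d) := by
        rw [show m - 0 = m by ring]; exact List.map_congr_left (fun k _ => hcast k)
    _ = (xs.drop i.toNat).take m.toNat := map_range_getD xs i.toNat m.toNat d (by omega)

theorem slice_map_window {α : Type} (ts : List (List (String × String))) (F : List (String × String) → α)
    (i m : Int) (hi : 0 ≤ i) (hm : 0 ≤ m) :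
    PySem.List.slice (ts.map F) (some i) (some (i + m))
      = ((ts.drop i.toNat).take m.toNat).map F := by
  rw [PySem.List.slice_toNat _ hi (by omega)]
  rw [show (i + m).toNat - i.toNat = m.toNat by omega]
  simp [List.map_drop, List.map_take]

theorem extract_features_sent_dyn_spec : Claim_equal_extract_features_sent_dyn := by
  unfold Claim_equal_extract_features_sent_dyn
  intro sentence w_size feature_names _ hpre
  obtain ⟨hw, _⟩ := hpre
  unfold Spec_extract_features_sent_dyn
  simp only [extract_features_sent_dyn, extract_features_sent_dyn_alt]
  set padded := PySem.List.pyRepeat [[("form","BOS"),("pos","BOS"),("chunk","BOS")]] w_size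
    ++ sentence ++ PySem.List.pyRepeat [[("form","EOS"),("pos","EOS"),("chunk","EOS")]] w_size with hpad
  apply PySem.List.foldl_congr_mem
  intro acc i hi
  rw [PySem.List.mem_pyRange_one] at hi
  obtain ⟨hi0, hiU⟩ := hi
  have hspan : (0 : Int) ≤ 2 * w_size + 1 := by omega
  have hb1 : i + (2 * w_size + 1) ≤ (padded.length : Int) := by omega
  have hb2 : i + w_size ≤ (padded.length : Int) := by omega
  -- the three inner append-loops of A are maps over the window
  rw [PySem.List.foldl_append_singleton_eq_map, PySem.List.foldl_append_singleton_eq_map,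
      PySem.List.foldl_append_singleton_eq_map]
  rw [List.nil_append]
  -- each map over the window is the corresponding column slice of B
  have key : ∀ (F : List (String × String) → String) (m : Int), 0 ≤ m → i + m ≤ (padded.length : Int) →
      (PySem.List.pyRange 0 m 1).map (fun j => F (PySem.List.pyGetD padded (i + j) []))
        = PySem.List.slice (padded.map F) (some i) (some (i + m)) := by
    intro F m hm hb
    rw [slice_map_window padded F i m hi0 hm, ← map_pyRange_window padded i m ([] : List (String × String)) hi0 hm hb,
        List.map_map]
    rfl
  rw [key (fun t => PySem.Str.lower (pvGetKey t "form")) (2 * w_size + 1) hspan hb1,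
      key (fun t => pvGetKey t "pos") (2 * w_size + 1) hspan hb1,
      key (fun t => pvGetKey t "chunk") w_size hw hb2]
  -- the y entry: reading the chunk column at i + w_size
  have hy : pvGetKey (PySem.List.pyGetD padded (i + w_size) []) "chunk"
      = PySem.List.pyGetD (padded.map (fun t => pvGetKey t "chunk")) (i + w_size) "" := by
    have h1 : 0 ≤ i + w_size := by omega
    have h2 : i + w_size < (padded.length : Int) := by omega
    rw [PySem.List.pyGetD_eq_getElem _ _ h1 h2,
        PySem.List.pyGetD_eq_getElem _ _ h1 (by simpa using h2)]
    simp
  rw [hy]
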